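-- pv_equiv track=rewrite | github.com/jngmk/Training | Python/Programmers/[2019카카오공채] 징검다리 건너기/solution2.py | check
-- ===== SOURCE A (Python) =====
-- def check(stones, num, k):
--     impossible = 0
--     for stone in stones:
--         if stone < num:
--             impossible += 1
--         else:
--             impossible = 0
--         if impossible >= k:
--             return False
--     return True
-- ===== SOURCE B (Python) =====
-- def _longest_below_run(xs, num):
--     # longest maximal run of consecutive stones below num, by a two-pointer run scan
--     best = 0
--     i = 0
--     n = len(xs)
--     while i < n:
--         j = i
--         while j < n and xs[j] < num:
--             j += 1
--         best = max(best, j - i)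
--         i = j + 1
--     return best
--
-- def check(stones, num, k):
--     return not stones or _longest_below_run(stones, num) < k
-- ===== Notes on version B (the rewrite author's own statement) =====
-- stated objective: alternative
-- what changed: B computes the longest maximal run of stones below num with a two-pointer run-by-run index scan and compares that maximum to k once, instead of A's single stateful reset-counter with an early threshold exit.
import Mathlib
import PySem

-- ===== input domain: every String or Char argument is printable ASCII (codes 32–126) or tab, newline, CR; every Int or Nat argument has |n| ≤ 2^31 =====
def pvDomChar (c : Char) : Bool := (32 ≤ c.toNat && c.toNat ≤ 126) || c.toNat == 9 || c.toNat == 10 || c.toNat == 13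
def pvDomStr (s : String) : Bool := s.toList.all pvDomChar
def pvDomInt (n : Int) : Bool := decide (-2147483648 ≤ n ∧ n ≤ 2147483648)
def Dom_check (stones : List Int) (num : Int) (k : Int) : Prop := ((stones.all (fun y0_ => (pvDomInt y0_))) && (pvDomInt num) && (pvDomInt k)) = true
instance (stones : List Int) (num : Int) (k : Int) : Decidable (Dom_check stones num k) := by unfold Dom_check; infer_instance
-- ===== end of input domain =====

-- B replaces A's stateful reset-counter with an early threshold exit by a two-pointer run-by-run
-- scan computing the longest run of stones below num, compared to k once (alternative decomposition).

-- ===== PORT A =====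
-- the for-loop with early `return False`: structural recursion over stones carrying `impossible`
def checkGo (num k : Int) : List Int → Int → Bool
  | [], _ => true
  | stone :: rest, impossible =>
      let impossible' := if stone < num then impossible + 1 else 0
      if k ≤ impossible' then false else checkGo num k rest impossible'

def check (stones : List Int) (num : Int) (k : Int) : Bool :=
  checkGo num k stones 0

-- ===== PORT B =====
-- Source B's inner `while j < n and xs[j] < num: j += 1`; the guard j < n makes xs[j] in range,
-- so the total pyGetD form of xs[j] is exact here
def lbrScan (num : Int) (xs : List Int) (n : Nat) (j : Nat) : Nat :=
  if h : j < n ∧ PySem.List.pyGetD xs (j : Int) 0 < num then lbrScan num xs n (j + 1) else j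
termination_by n - j
decreasing_by omega

-- termination helper for lbrOuter (the outer while advances i to at least j + 1 ≥ i + 1)
theorem lbrScan_ge (num : Int) (xs : List Int) (n : Nat) : ∀ j, j ≤ lbrScan num xs n j := by
  intro j
  induction hfuel : n - j using Nat.strong_induction_on generalizing j with
  | _ fuel ih =>
    rw [lbrScan]
    split
    · next hc =>
      have := ih (n - (j + 1)) (by omega) (j + 1) rfl
      omega
    · omega

-- Source B's outer `while i < n:` loop carrying `best`
def lbrOuter (num : Int) (xs : List Int) (n : Nat) (i : Nat) (best : Int) : Int :=
  if _h : i < n then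
    let j := lbrScan num xs n i
    lbrOuter num xs n (j + 1) (max best ((j : Int) - (i : Int)))
  else best
termination_by n - i
decreasing_by
  have := lbrScan_ge num xs n i
  omega

def check_alt (stones : List Int) (num : Int) (k : Int) : Bool :=
  decide (stones = []) || decide (lbrOuter num stones stones.length 0 0 < k)

-- ===== PRECONDITION & SPEC =====
def Spec_check (stones : List Int) (num : Int) (k : Int) (out : Bool) : Prop := out = check_alt stones num k
instance (stones : List Int) (num : Int) (k : Int) (out : Bool) : Decidable (Spec_check stones num k out) := by unfold Spec_check; infer_instance

-- ===== CLAIM (what is proved, stated in full; the proofs are below) =====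
def Claim_equal_check : Prop := ∀ (stones : List Int) (num : Int) (k : Int), Dom_check stones num k → Spec_check stones num k (check stones num k)

-- ===== LEMMAS AND PROOFS =====

-- proof-side helper: max of the carry c and of all counter values A's loop will check
def msPeak (num : Int) : List Int → Int → Int
  | [], c => c
  | x :: t, c => max c (msPeak num t (if x < num then c + 1 else 0))

-- proof-side helper: list-level form of B's run-by-run scan (strip the leading run, skip
-- the separator, keep the max); lbrOuter is reduced to it, and it to msPeak
def lbrGo (num : Int) : List Int → Int → Int
  | [], best => best
  | x :: rest, best =>
      let run := ((x :: rest).takeWhile (fun s => decide (s < num))).length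
      lbrGo num ((x :: rest).drop (run + 1)) (max best (run : Int))
termination_by xs _ => xs.length
decreasing_by
  simp

theorem msPeak_ge (num : Int) (xs : List Int) (c : Int) : c ≤ msPeak num xs c := by
  cases xs with
  | nil => simp [msPeak]
  | cons x t => simp [msPeak]

theorem checkGo_eq_msPeak (num k : Int) (xs : List Int) (c : Int) (hc : c < k) :
    checkGo num k xs c = decide (msPeak num xs c < k) := by
  induction xs generalizing c with
  | nil => simp [checkGo, msPeak, hc]
  | cons x t ih =>
    simp only [checkGo, msPeak]
    by_cases h : k ≤ (if x < num then c + 1 else 0)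
    · have := msPeak_ge num t (if x < num then c + 1 else 0)
      simp only [h, if_true]
      have : ¬ (max c (msPeak num t (if x < num then c + 1 else 0)) < k) := by omega
      simp [this]
    · rw [if_neg h, ih _ (by omega)]
      have := msPeak_ge num t (if x < num then c + 1 else 0)
      by_cases h2 : msPeak num t (if x < num then c + 1 else 0) < k
      · have h3 : max c (msPeak num t (if x < num then c + 1 else 0)) < k := by omega
        simp [h2, h3]
      · have h3 : ¬ (max c (msPeak num t (if x < num then c + 1 else 0)) < k) := by omega
        simp [h2, h3]

theorem msPeak_below_append (num : Int) (ys zs : List Int) (c : Int)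
    (h : ∀ y ∈ ys, y < num) : msPeak num (ys ++ zs) c = msPeak num zs (c + ys.length) := by
  induction ys generalizing c with
  | nil => simp
  | cons y t ih =>
    have hy : y < num := h y (List.mem_cons_self)
    have ht : ∀ y ∈ t, y < num := fun z hz => h z (List.mem_cons_of_mem _ hz)
    simp only [List.cons_append, msPeak, if_pos hy, ih _ ht]
    have h1 : c + 1 ≤ msPeak num zs (c + 1 + (t.length : Int)) := by
      have := msPeak_ge num zs (c + 1 + (t.length : Int))
      have : (0:Int) ≤ (t.length : Int) := Int.natCast_nonneg _
      omega
    have harg : c + ((y :: t).length : Int) = c + 1 + (t.length : Int) := by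
      push_cast [List.length_cons]; ring
    rw [harg]
    omega

theorem dropWhile_cons_not {p : Int → Bool} (l : List Int) (z : Int) (zs : List Int)
    (h : l.dropWhile p = z :: zs) : p z = false := by
  induction l with
  | nil => simp [List.dropWhile] at h
  | cons a l ih =>
    by_cases hp : p a = true
    · rw [List.dropWhile_cons_of_pos hp] at h
      exact ih h
    · rw [List.dropWhile_cons_of_neg hp] at h
      cases h
      simpa using hp

theorem lbrGo_eq_msPeak (num : Int) (xs : List Int) (best : Int) (hb : 0 ≤ best) :
    lbrGo num xs best = max best (msPeak num xs 0) := by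
  induction hn : xs.length using Nat.strong_induction_on generalizing xs best with
  | _ n ih =>
  cases xs with
  | nil => simp [lbrGo, msPeak]; omega
  | cons x t =>
    obtain ⟨tw, dr, htw, hdr⟩ : ∃ tw dr, tw = (x :: t).takeWhile (fun s => decide (s < num)) ∧
        dr = (x :: t).dropWhile (fun s => decide (s < num)) := ⟨_, _, rfl, rfl⟩
    have hsplit : tw ++ dr = x :: t := by
      rw [htw, hdr]; exact List.takeWhile_append_dropWhile
    have htwlt : ∀ y ∈ tw, y < num := by
      intro y hy
      rw [htw] at hy
      simpa using List.mem_takeWhile_imp hy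
    cases dr with
    | nil =>
      have hxeq : (x :: t) = tw := by rw [← hsplit, List.append_nil]
      rw [lbrGo, ← htw]
      have hdropall : (x :: t).drop (tw.length + 1) = [] := by
        apply List.drop_eq_nil_of_le
        rw [hxeq]; omega
      rw [hdropall, lbrGo]
      have hms : msPeak num (x :: t) 0 = (tw.length : Int) := by
        rw [hxeq]
        have := msPeak_below_append num tw [] 0 htwlt
        simpa [msPeak] using this
      rw [hms]
    | cons z zs =>
      have hz : ¬ (z < num) := by
        have := dropWhile_cons_not _ _ _ hdr.symm
        simpa using this
      have hxsplit : (x :: t) = tw ++ z :: zs := hsplit.symm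
      rw [lbrGo, ← htw]
      have hdropzs : (x :: t).drop (tw.length + 1) = zs := by
        rw [hxsplit]
        simp [List.drop_length_add_append 1]
      rw [hdropzs]
      have hlen : zs.length < n := by
        have h5 : (x :: t).length = tw.length + 1 + zs.length := by
          rw [hxsplit]; simp; omega
        omega
      rw [ih zs.length (by omega) zs (max best (tw.length : Int)) (by positivity) rfl]
      have hms : msPeak num (x :: t) 0 = max (tw.length : Int) (msPeak num zs 0) := by
        rw [hxsplit, msPeak_below_append num tw (z :: zs) 0 htwlt]
        simp only [msPeak, if_neg hz]
        omega
      rw [hms]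
      omega

theorem lbrScan_eq (num : Int) (xs : List Int) : ∀ j, lbrScan num xs xs.length j =
    j + ((xs.drop j).takeWhile (fun s => decide (s < num))).length := by
  intro j
  induction hfuel : xs.length - j using Nat.strong_induction_on generalizing j with
  | _ fuel ih =>
    rw [lbrScan]
    split
    · next hc =>
      have hd : xs.drop j = xs[j] :: xs.drop (j + 1) := List.drop_eq_getElem_cons hc.1
      have hg : PySem.List.pyGetD xs (j : Int) 0 = xs[j] := by
        rw [PySem.List.pyGetD_natCast]
        exact List.getD_eq_getElem xs 0 hc.1
      have hlt : decide (xs[j] < num) = true := by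
        rw [hg] at hc; simpa using hc.2
      rw [hd, List.takeWhile_cons, hlt]
      rw [ih (xs.length - (j + 1)) (by omega) (j + 1) rfl]
      simp
      omega
    · next hc =>
      by_cases hj : j < xs.length
      · have hd : xs.drop j = xs[j] :: xs.drop (j + 1) := List.drop_eq_getElem_cons hj
        have hg : PySem.List.pyGetD xs (j : Int) 0 = xs[j] := by
          rw [PySem.List.pyGetD_natCast]
          exact List.getD_eq_getElem xs 0 hj
        have hge : ¬ (xs[j] < num) := by
          intro hcon
          exact hc ⟨hj, by rw [hg]; exact hcon⟩
        rw [hd, List.takeWhile_cons]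
        simp [hge]
      · rw [List.drop_eq_nil_of_le (by omega)]
        simp

theorem lbrOuter_eq_lbrGo (num : Int) (xs : List Int) : ∀ i best,
    lbrOuter num xs xs.length i best = lbrGo num (xs.drop i) best := by
  intro i best
  induction hfuel : xs.length - i using Nat.strong_induction_on generalizing i best with
  | _ fuel ih =>
    rw [lbrOuter]
    split
    · next hi =>
      have hd : xs.drop i = xs[i] :: xs.drop (i + 1) := List.drop_eq_getElem_cons hi
      rw [lbrScan_eq num xs i]
      rw [show lbrGo num (xs.drop i) best = lbrGo num (xs[i] :: xs.drop (i + 1)) best by rw [hd]]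
      rw [lbrGo, ← hd]
      set run := ((xs.drop i).takeWhile (fun s => decide (s < num))).length with hrun
      have hdd : (xs.drop i).drop (run + 1) = xs.drop (i + (run + 1)) := List.drop_drop ..
      have hcast : ((i + run : Nat) : Int) - (i : Int) = (run : Int) := by push_cast; ring
      rw [hdd]
      show lbrOuter num xs xs.length (i + run + 1) (max best (((i + run : Nat) : Int) - (i : Int))) =
        lbrGo num (xs.drop (i + (run + 1))) (max best (run : Int))
      rw [hcast, ih (xs.length - (i + run + 1)) (by omega) (i + run + 1) _ rfl]
      have : i + (run + 1) = i + run + 1 := by omega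
      rw [this]
    · next hi =>
      rw [List.drop_eq_nil_of_le (by omega), lbrGo]

theorem checkGo_neg_k (num k : Int) (x : Int) (t : List Int) (hk : k ≤ 0) :
    checkGo num k (x :: t) 0 = false := by
  simp only [checkGo]
  by_cases h : x < num
  · simp [h]; omega
  · simp [h]; omega

-- ===== VERDICT (by name: the statement is the Claim_ definition above) =====
theorem check_spec : Claim_equal_check := by
  intro stones num k _
  unfold Spec_check check check_alt
  cases stones with
  | nil => simp [checkGo, lbrOuter]
  | cons x t =>
    have hms0 : 0 ≤ msPeak num (x :: t) 0 := msPeak_ge num (x :: t) 0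
    rw [lbrOuter_eq_lbrGo num (x :: t) 0 0, List.drop_zero,
      lbrGo_eq_msPeak num (x :: t) 0 le_rfl]
    by_cases hk : k ≤ 0
    · rw [checkGo_neg_k num k x t hk]
      simp
      omega
    · rw [checkGo_eq_msPeak num k (x :: t) 0 (by omega)]
      simp
      omega
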